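-- pv_equiv track=rewrite | github.com/s-surineni/atice | leet_code/reduce_array_to_half.py | reduce_array_to_half
-- ===== SOURCE A (Python) =====
-- def reduce_array_to_half(arr):
--     orig_size = len(arr)
--     unique_vals = set(arr)
--
--     occur_count = {}
--     for val in unique_vals:
--         occurance = arr.count(val)
--         if occur_count.get(occurance):
--             occur_count[occurance].append(val)
--         else:
--             occur_count[occurance] = [val]
--
--     sorted_occ = sorted(occur_count.keys())[::-1]
--
--     curr_size = orig_size
--     removed = 0
--
--     while curr_size > orig_size // 2:
--         max_now = sorted_occ[0]
--         curr_size -= max_now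
--
--         # if not occur_count.get(max_now):
--         #     sorted_occ.pop()
--         # else:
--         #     occur_count[max_now].pop()
--
--         occur_count[max_now].pop()
--         if not occur_count.get(max_now):
--             sorted_occ.pop(0)
--
--         removed += 1
--     return removed
-- ===== SOURCE B (Python) =====
-- def reduce_array_to_half(arr):
--     n = len(arr)
--     counts = {}
--     for x in arr:
--         counts[x] = counts.get(x, 0) + 1
--     # histogram over frequencies: freq_hist[f] = number of distinct values occurring exactly f times
--     freq_hist = {}
--     for f in counts.values():
--         freq_hist[f] = freq_hist.get(f, 0) + 1
--     # complement view: keep as many of the cheapest (least frequent) values as fit into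
--     # n // 2 array slots, taking whole frequency buckets at once by integer division;
--     # the answer is the number of distinct values NOT kept.
--     budget = n // 2
--     kept = 0
--     for f in range(1, n + 1):
--         take = min(freq_hist.get(f, 0), budget // f)
--         kept += take
--         budget -= take * f
--     return len(counts) - kept
-- ===== Notes on version B (the rewrite author's own statement) =====
-- stated objective: faster
-- what changed: Instead of A's repeated arr.count scans and a greedy loop that removes the most frequent values one by one, B builds a frequency histogram in linear passes and solves the complement problem: it keeps the cheapest (least frequent) values, consuming whole frequency buckets at once via integer division over ascending frequencies, and returns distinct-count minus kept; no sorting at all.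
import Mathlib
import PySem

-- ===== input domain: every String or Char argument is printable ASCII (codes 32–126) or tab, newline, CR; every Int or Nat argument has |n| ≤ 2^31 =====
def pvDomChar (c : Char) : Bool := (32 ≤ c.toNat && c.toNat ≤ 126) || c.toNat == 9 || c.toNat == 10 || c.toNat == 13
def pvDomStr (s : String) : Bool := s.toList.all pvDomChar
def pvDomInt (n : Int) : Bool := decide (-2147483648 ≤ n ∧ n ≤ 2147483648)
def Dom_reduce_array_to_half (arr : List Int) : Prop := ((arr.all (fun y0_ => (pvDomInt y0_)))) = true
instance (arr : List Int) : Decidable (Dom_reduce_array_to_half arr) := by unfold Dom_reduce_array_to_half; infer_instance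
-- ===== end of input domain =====

-- B replaces A's per-unique-value arr.count scans and greedy most-frequent-first removal loop by
-- linear counting passes into a frequency histogram and the complement problem: keep the cheapest
-- (least frequent) values bucket by bucket via integer division, no sorting (faster).

-- ===== PORT A =====
-- A's while loop. fuel = len(arr) bounds the iteration count (each pass pops one stored value);
-- the two `none => removed` branches are where Python would raise (IndexError/KeyError) — they
-- are unreachable for every input, as the equivalence proof below in effect shows.
def pvAloop (fuel : Nat) (d : PySem.Dict Int (List Int)) (so : List Int)
    (target curr removed : Int) : Int :=
  match fuel with
  | 0 => removed
  | fuel + 1 =>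
    if curr > target then
      match PySem.List.pyGet? so 0 with           -- max_now = sorted_occ[0]
      | none => removed
      | some max_now =>
        match PySem.List.pop? (d.getD max_now []) (-1) with   -- occur_count[max_now].pop()
        | none => removed
        | some (_, l') =>
          let d' := d.insert max_now l'
          -- if not occur_count.get(max_now): sorted_occ.pop(0)
          let so' := if l' = [] then so.tail else so
          pvAloop fuel d' so' target (curr - max_now) (removed + 1)
    else removed

-- A iterates `for val in unique_vals` over a Python set: the dict built from it is only sorted
-- on its keys / looked up afterwards, so the returned count is independent of that hash order.
def reduce_array_to_half (arr : List Int) : Int :=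
  let orig_size : Int := (arr.length : Int)
  let unique_vals := PySem.Set.ofList arr
  let occur_count :=
    unique_vals.foldl (fun d v =>
      let occurance : Int := (PySem.List.count arr v : Int)
      match d.get? occurance with
      | some l => if l = [] then d.insert occurance [v] else d.insert occurance (l ++ [v])
      | none => d.insert occurance [v]) PySem.Dict.empty
  let sorted_occ :=
    (PySem.List.slice? (PySem.List.sorted occur_count.keys (fun k => k) false) none none (-1)).getD []
  pvAloop arr.length occur_count sorted_occ (PySem.Int.floordiv orig_size 2) orig_size 0

-- ===== PORT B =====
def reduce_array_to_half_alt (arr : List Int) : Int :=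
  let n : Int := (arr.length : Int)
  let counts := arr.foldl (fun d x => d.insert x (d.getD x 0 + 1)) PySem.Dict.empty
  let freq_hist := counts.values.foldl (fun d f => d.insert f (d.getD f 0 + 1)) PySem.Dict.empty
  let st := (PySem.List.pyRange 1 (n + 1) 1).foldl
      (fun (st : Int × Int) f =>
        let take := min (freq_hist.getD f 0) (PySem.Int.floordiv st.1 f)
        (st.1 - take * f, st.2 + take))
      (PySem.Int.floordiv n 2, 0)            -- state: (budget, kept)
  (counts.size : Int) - st.2

-- ===== PRECONDITION & SPEC =====
def Spec_reduce_array_to_half (arr : List Int) (out : Int) : Prop := out = reduce_array_to_half_alt arr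
instance (arr : List Int) (out : Int) : Decidable (Spec_reduce_array_to_half arr out) := by unfold Spec_reduce_array_to_half; infer_instance

-- ===== CLAIM (what is proved, stated in full; the proofs are below) =====
def Claim_equal_reduce_array_to_half : Prop := ∀ (arr : List Int), Dom_reduce_array_to_half arr → Spec_reduce_array_to_half arr (reduce_array_to_half arr)

-- ===== LEMMAS AND PROOFS =====

-- A's loop, abstracted: consume a prefix of the (descending) frequency list until `need` is spent
def pvBgreedy : List Int → Int → Int → Int
  | [], _, removed => removed
  | f :: rest, need, removed =>
    if need ≤ 0 then removed else pvBgreedy rest (need - f) (removed + 1)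

-- the multiset of values A's loop consumes, reading the dict along the key list `so`
def pvFlat (d : PySem.Dict Int (List Int)) (so : List Int) : List Int :=
  so.flatMap (fun k => List.replicate (d.getD k []).length k)

theorem pvFlatMap_congr {α β : Type} {l : List α} {f g : α → List β}
    (h : ∀ x ∈ l, f x = g x) : l.flatMap f = l.flatMap g := by
  induction l with
  | nil => rfl
  | cons a l ih =>
    simp only [List.flatMap_cons]
    rw [h a (by simp), ih (fun x hx => h x (by simp [hx]))]

-- flattening the distinct elements with their multiplicities is a permutation of the list
theorem pvFlat_perm (xs : List Int) :
    ((PySem.Set.ofList xs).flatMap (fun c => List.replicate (List.count c xs) c)).Perm xs := by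
  induction xs with
  | nil => simp [PySem.Set.ofList]
  | cons x xs ih =>
    rw [PySem.Set.ofList_cons]
    simp only [List.flatMap_cons]
    have hD : ((PySem.Set.ofList xs).discard x).flatMap
        (fun c => List.replicate (List.count c (x :: xs)) c)
        = ((PySem.Set.ofList xs).discard x).flatMap
        (fun c => List.replicate (List.count c xs) c) := by
      refine pvFlatMap_congr (fun c hc => ?_)
      have hcx : c ≠ x := ((PySem.Set.mem_discard _ _ _).mp hc).2
      simp [Ne.symm hcx]
    rw [hD, List.count_cons_self, List.replicate_succ, List.cons_append]
    refine List.Perm.cons x ?_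
    by_cases hx : x ∈ xs
    · have hxo : x ∈ PySem.Set.ofList xs := (PySem.Set.mem_ofList _ _).mpr hx
      have hnd : (PySem.Set.ofList xs).Nodup := PySem.Set.nodup_ofList xs
      have hDnd : ((PySem.Set.ofList xs).discard x).Nodup := PySem.Set.nodup_discard _ _ hnd
      have hxD : x ∉ (PySem.Set.ofList xs).discard x := by
        intro h; exact ((PySem.Set.mem_discard _ _ _).mp h).2 rfl
      have hperm : (PySem.Set.ofList xs).Perm (x :: (PySem.Set.ofList xs).discard x) := by
        refine (List.perm_ext_iff_of_nodup hnd (List.nodup_cons.mpr ⟨hxD, hDnd⟩)).mpr (fun a => ?_)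
        constructor
        · intro ha
          by_cases hax : a = x
          · exact hax ▸ List.mem_cons_self
          · exact List.mem_cons_of_mem _ ((PySem.Set.mem_discard _ _ _).mpr ⟨ha, hax⟩)
        · intro ha
          rcases List.mem_cons.mp ha with h | h
          · exact h ▸ hxo
          · exact ((PySem.Set.mem_discard _ _ _).mp h).1
      have := (hperm.flatMap (g := fun c => List.replicate (List.count c xs) c)
        (fun a _ => List.Perm.refl _)).symm.trans ih
      simpa only [List.flatMap_cons] using this
    · have h0 : List.count x xs = 0 := List.count_eq_zero.mpr hx
      rw [h0]
      simp only [List.replicate_zero, List.nil_append]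
      have hnd : (PySem.Set.ofList xs).Nodup := PySem.Set.nodup_ofList xs
      have hperm : ((PySem.Set.ofList xs).discard x).Perm (PySem.Set.ofList xs) := by
        refine (List.perm_ext_iff_of_nodup (PySem.Set.nodup_discard _ _ hnd) hnd).mpr (fun a => ?_)
        constructor
        · intro ha; exact ((PySem.Set.mem_discard _ _ _).mp ha).1
        · intro ha
          refine (PySem.Set.mem_discard _ _ _).mpr ⟨ha, ?_⟩
          intro hax
          exact hx (hax ▸ (PySem.Set.mem_ofList _ _).mp ha)
      exact (hperm.flatMap (fun a _ => List.Perm.refl _)).trans ih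

theorem pvFlat_pairwise (so : List Int) (n : Int → Nat) (h : so.Pairwise (fun a b => b ≤ a)) :
    (so.flatMap (fun c => List.replicate (n c) c)).Pairwise (fun a b : Int => b ≤ a) := by
  induction so with
  | nil => simp
  | cons a so ih =>
    rcases List.pairwise_cons.mp h with ⟨ha, h'⟩
    simp only [List.flatMap_cons]
    rw [List.pairwise_append]
    refine ⟨List.pairwise_replicate.mpr (Or.inr le_rfl), ih h', ?_⟩
    intro x hx y hy
    rcases List.mem_flatMap.mp hy with ⟨c, hc, hyc⟩
    rw [List.eq_of_mem_replicate hx, List.eq_of_mem_replicate hyc]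
    exact ha c hc

theorem pvAloop_succ (fuel : Nat) (d : PySem.Dict Int (List Int)) (so : List Int)
    (target curr removed : Int) :
    pvAloop (fuel + 1) d so target curr removed =
      if curr > target then
        match PySem.List.pyGet? so 0 with
        | none => removed
        | some max_now =>
          match PySem.List.pop? (d.getD max_now []) (-1) with
          | none => removed
          | some (_, l') =>
            pvAloop fuel (d.insert max_now l') (if l' = [] then so.tail else so) target
              (curr - max_now) (removed + 1)
      else removed := rfl

-- A's while loop is the greedy prefix fold over the flattened frequency list
theorem pvBgreedy_cons (f : Int) (rest : List Int) (need removed : Int) :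
    pvBgreedy (f :: rest) need removed =
      if need ≤ 0 then removed else pvBgreedy rest (need - f) (removed + 1) := rfl

theorem pvAloop_eq_greedy (fuel : Nat) (d : PySem.Dict Int (List Int)) (so : List Int)
    (target curr removed : Int) (hnd : so.Nodup) (hne : ∀ k ∈ so, d.getD k [] ≠ [])
    (hlen : (pvFlat d so).length ≤ fuel) :
    pvAloop fuel d so target curr removed = pvBgreedy (pvFlat d so) (curr - target) removed := by
  induction fuel generalizing d so curr removed with
  | zero =>
    have h0 : pvFlat d so = [] := List.eq_nil_of_length_eq_zero (Nat.le_zero.mp hlen)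
    rw [h0]; rfl
  | succ fuel ih =>
    cases so with
    | nil =>
      rw [pvAloop_succ]
      simp [pvFlat, pvBgreedy, PySem.List.pyGet?]
    | cons k rest =>
      have hl : d.getD k [] ≠ [] := hne k List.mem_cons_self
      have hknr : k ∉ rest := (List.nodup_cons.mp hnd).1
      have hrest : rest.Nodup := (List.nodup_cons.mp hnd).2
      have hne' : ∀ c ∈ rest, c ≠ k := fun c hc h => hknr (by rwa [h] at hc)
      obtain ⟨l0, x0, hL⟩ : ∃ l0 x0, d.getD k [] = l0 ++ [x0] :=
        ⟨(d.getD k []).dropLast, (d.getD k []).getLast hl, (List.dropLast_append_getLast hl).symm⟩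
      have hpop : PySem.List.pop? (d.getD k []) (-1) = some (x0, l0) := by
        rw [hL]; exact PySem.List.pop?_last l0 x0
      have hflat : pvFlat d (k :: rest) = k :: (List.replicate l0.length k ++ pvFlat d rest) := by
        simp only [pvFlat, List.flatMap_cons, hL]
        simp [List.replicate_succ]
      have hflat_rest : ∀ l', pvFlat (d.insert k l') rest = pvFlat d rest := by
        intro l'
        refine pvFlatMap_congr (fun c hc => ?_)
        rw [PySem.Dict.getD_insert_of_ne _ _ _ (hne' c hc)]
      rw [pvAloop_succ]
      by_cases hct : curr > target
      · rw [if_pos hct]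
        simp only [PySem.List.pyGet?_zero_cons, hpop]
        rw [hflat, pvBgreedy_cons, if_neg (show ¬(curr - target ≤ 0) by omega)]
        by_cases hcase : l0 = []
        · rw [if_pos hcase, List.tail_cons]
          have hinv : ∀ c ∈ rest, (d.insert k l0).getD c [] ≠ [] := fun c hc => by
            rw [PySem.Dict.getD_insert_of_ne _ _ _ (hne' c hc)]
            exact hne c (List.mem_cons_of_mem _ hc)
          have hlen' : (pvFlat (d.insert k l0) rest).length ≤ fuel := by
            rw [hflat_rest]
            rw [hflat] at hlen
            simp only [List.length_cons, List.length_append, List.length_replicate] at hlen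
            omega
          rw [ih (d.insert k l0) rest (curr - k) (removed + 1) hrest hinv hlen']
          rw [hflat_rest, hcase]
          simp only [List.length_nil, List.replicate_zero, List.nil_append]
          congr 1
          omega
        · rw [if_neg hcase]
          have hflat' : pvFlat (d.insert k l0) (k :: rest)
              = List.replicate l0.length k ++ pvFlat d rest := by
            simp only [pvFlat, List.flatMap_cons]
            rw [PySem.Dict.getD_insert_self]
            congr 1
            exact hflat_rest _
          have hinv : ∀ c ∈ k :: rest, (d.insert k l0).getD c [] ≠ [] := by
            intro c hc
            rcases List.mem_cons.mp hc with h | h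
            · rw [h, PySem.Dict.getD_insert_self]; exact hcase
            · rw [PySem.Dict.getD_insert_of_ne _ _ _ (hne' c h)]
              exact hne c (List.mem_cons_of_mem _ h)
          have hlen' : (pvFlat (d.insert k l0) (k :: rest)).length ≤ fuel := by
            rw [hflat']
            rw [hflat] at hlen
            simp only [List.length_cons, List.length_append, List.length_replicate] at hlen ⊢
            omega
          rw [ih (d.insert k l0) (k :: rest) (curr - k) (removed + 1) hnd hinv hlen']
          rw [hflat']
          congr 1
          omega
      · rw [if_neg hct, hflat, pvBgreedy_cons, if_pos (show curr - target ≤ 0 by omega)]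

-- ---- characterisation of A's grouping dict ----

-- the frequency list: the count of each distinct element, in first-occurrence order
def pvM (arr : List Int) : List Int :=
  (PySem.Set.ofList arr).map (fun v => ((List.count v arr : Nat) : Int))

-- A's grouping fold, named so the proofs can speak about it
def pvAfold (arr : List Int) : PySem.Dict Int (List Int) :=
  (PySem.Set.ofList arr).foldl (fun d v =>
    let occurance : Int := (PySem.List.count arr v : Int)
    match d.get? occurance with
    | some l => if l = [] then d.insert occurance [v] else d.insert occurance (l ++ [v])
    | none => d.insert occurance [v]) PySem.Dict.empty

theorem pvStep_eq (d : PySem.Dict Int (List Int)) (c v : Int) :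
    (match d.get? c with
     | some l => if l = [] then d.insert c [v] else d.insert c (l ++ [v])
     | none => d.insert c [v])
    = d.modify c [] (· ++ [v]) := by
  cases h : d.get? c with
  | none => simp [h, PySem.Dict.modify, PySem.Dict.getD]
  | some l =>
    cases l with
    | nil => simp [h, PySem.Dict.modify, PySem.Dict.getD]
    | cons a t => simp [h, PySem.Dict.modify, PySem.Dict.getD]

theorem pvAfold_mod (arr : List Int) :
    pvAfold arr
      = ((PySem.Set.ofList arr).map (fun v => (((PySem.List.count arr v : Nat) : Int), v))).foldl
          (fun d p => d.modify p.1 [] (· ++ [p.2])) PySem.Dict.empty := by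
  have hstep : (fun (d : PySem.Dict Int (List Int)) (v : Int) =>
      let occurance : Int := (PySem.List.count arr v : Int)
      match d.get? occurance with
      | some l => if l = [] then d.insert occurance [v] else d.insert occurance (l ++ [v])
      | none => d.insert occurance [v])
      = fun d v => d.modify ((PySem.List.count arr v : Nat) : Int) [] (· ++ [v]) :=
    funext fun d => funext fun v => pvStep_eq d _ v
  unfold pvAfold
  rw [hstep]
  exact (List.foldl_map (f := fun v : Int => (((PySem.List.count arr v : Nat) : Int), v))
    (g := fun (d : PySem.Dict Int (List Int)) (p : Int × Int) => d.modify p.1 [] (· ++ [p.2]))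
    (l := PySem.Set.ofList arr) (init := PySem.Dict.empty)).symm

theorem pvAfold_keys (arr : List Int) :
    (pvAfold arr).keys = PySem.Set.ofList (pvM arr) := by
  have hstep : (fun (d : PySem.Dict Int (List Int)) (v : Int) =>
      let occurance : Int := (PySem.List.count arr v : Int)
      match d.get? occurance with
      | some l => if l = [] then d.insert occurance [v] else d.insert occurance (l ++ [v])
      | none => d.insert occurance [v])
      = fun d v => d.modify ((PySem.List.count arr v : Nat) : Int) [] (· ++ [v]) :=
    funext fun d => funext fun v => pvStep_eq d _ v
  unfold pvAfold
  rw [hstep]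
  rw [PySem.Dict.keys_foldl_modify_key (PySem.Set.ofList arr)
    (fun v => ((PySem.List.count arr v : Nat) : Int)) [] (fun _ v => (· ++ [v])) PySem.Dict.empty]
  show (PySem.Set.empty : PySem.Set Int).update _ = _
  rw [PySem.Set.update_empty]
  simp [pvM, PySem.List.count_eq]

theorem pvAfold_len (arr : List Int) (c : Int) :
    ((pvAfold arr).getD c []).length = List.count c (pvM arr) := by
  rw [pvAfold_mod, PySem.Dict.getD_foldl_modify_append]
  simp [pvM, List.count_eq_countP, List.countP_map, Function.comp_def,
    ← List.countP_eq_length_filter, PySem.List.count_eq]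

theorem pvAssemble (n : Nat) (d0 : PySem.Dict Int (List Int)) (m : List Int)
    (hkeys : d0.keys = PySem.Set.ofList m)
    (hlenD : ∀ c, (d0.getD c []).length = List.count c m)
    (hml : m.length ≤ n) :
    pvAloop n d0 ((PySem.List.sorted d0.keys (fun k => k) false).reverse)
      (PySem.Int.floordiv (n : Int) 2) (n : Int) 0
    = pvBgreedy (PySem.List.sorted m (fun v => v) true)
      ((n : Int) - PySem.Int.floordiv (n : Int) 2) 0 := by
  set so := (PySem.List.sorted d0.keys (fun k => k) false).reverse with hso
  have hmnd : (PySem.Set.ofList m).Nodup := PySem.Set.nodup_ofList m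
  have hsnd : so.Nodup := by
    rw [hso, List.nodup_reverse]
    exact ((PySem.List.sorted_perm d0.keys (fun k => k) false).nodup_iff).mpr (hkeys ▸ hmnd)
  have hsp : so.Pairwise (fun a b : Int => b ≤ a) := by
    rw [hso, List.pairwise_reverse]
    simpa using PySem.List.sorted_pairwise d0.keys (fun k => k)
  have h1 : so.Perm (PySem.Set.ofList m) := by
    rw [hso]
    exact (List.reverse_perm _).trans ((PySem.List.sorted_perm _ _ _).trans (by rw [hkeys]))
  have hflatfun : (fun k => List.replicate (d0.getD k []).length k)
      = (fun c : Int => List.replicate (List.count c m) c) :=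
    funext fun c => by rw [hlenD c]
  have hperm : (pvFlat d0 so).Perm m := by
    unfold pvFlat
    rw [hflatfun]
    exact (h1.flatMap (fun a _ => List.Perm.refl _)).trans (pvFlat_perm m)
  have hpair1 : (pvFlat d0 so).Pairwise (fun a b : Int => b ≤ a) :=
    pvFlat_pairwise so (fun k => (d0.getD k []).length) hsp
  have hfs_pair : (PySem.List.sorted m (fun v => v) true).Pairwise (fun a b : Int => b ≤ a) := by
    simpa using PySem.List.sorted_pairwise_rev m (fun v => v)
  have heq : pvFlat d0 so = PySem.List.sorted m (fun v => v) true := by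
    refine PySem.List.eq_of_perm_of_pairwise_le_of_injective (fun x : Int => -x) neg_injective
      (hperm.trans (PySem.List.sorted_perm m (fun v => v) true).symm) ?_ ?_
    · exact hpair1.imp (fun h => by simpa using neg_le_neg h)
    · exact hfs_pair.imp (fun h => by simpa using neg_le_neg h)
  have hne : ∀ k ∈ so, d0.getD k [] ≠ [] := by
    intro k hk heq0
    have hkm : k ∈ m := (PySem.Set.mem_ofList _ _).mp (h1.mem_iff.mp hk)
    have hc := hlenD k
    rw [heq0] at hc
    simp only [List.length_nil] at hc
    have hpos := List.count_pos_iff.mpr hkm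
    omega
  have hfl : (pvFlat d0 so).length ≤ n := by
    rw [hperm.length_eq]
    exact hml
  rw [pvAloop_eq_greedy n d0 so _ _ 0 hsnd hne hfl, heq]

-- ---- B-side: the keep-the-cheapest recursion and its duel with the greedy removal ----

-- per-element form of B's loop: walk the ascending frequency list, keep an element iff it fits
-- the remaining budget; returns (remaining budget, number kept)
def pvKeepR : List Int → Int → Int × Int
  | [], b => (b, 0)
  | f :: rest, b =>
    if f ≤ b then ((pvKeepR rest (b - f)).1, (pvKeepR rest (b - f)).2 + 1)
    else pvKeepR rest b

theorem pvKeepR_append (s t : List Int) (b : Int) :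
    pvKeepR (s ++ t) b
      = ((pvKeepR t (pvKeepR s b).1).1, (pvKeepR s b).2 + (pvKeepR t (pvKeepR s b).1).2) := by
  induction s generalizing b with
  | nil => simp [pvKeepR]
  | cons f s ih =>
    simp only [List.cons_append, pvKeepR]
    by_cases h : f ≤ b
    · rw [if_pos h, if_pos h, ih]
      exact Prod.ext rfl (by simp only; omega)
    · rw [if_neg h, if_neg h, ih]

theorem pvKeepR_rem_le (s : List Int) (b : Int) (h1 : ∀ x ∈ s, 1 ≤ x) :
    (pvKeepR s b).1 ≤ b := by
  induction s generalizing b with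
  | nil => simp [pvKeepR]
  | cons f s ih =>
    simp only [pvKeepR]
    have hf : 1 ≤ f := h1 f List.mem_cons_self
    have h1' : ∀ x ∈ s, 1 ≤ x := fun x hx => h1 x (List.mem_cons_of_mem _ hx)
    by_cases h : f ≤ b
    · rw [if_pos h]
      have := ih (b - f) h1'
      simp only
      omega
    · rw [if_neg h]
      exact ih b h1'

theorem pvKeepR_kept_bounds (s : List Int) (b : Int) :
    0 ≤ (pvKeepR s b).2 ∧ (pvKeepR s b).2 ≤ (s.length : Int) := by
  induction s generalizing b with
  | nil => simp [pvKeepR]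
  | cons f s ih =>
    simp only [pvKeepR, List.length_cons]
    by_cases h : f ≤ b
    · rw [if_pos h]
      have := ih (b - f)
      push_cast
      omega
    · rw [if_neg h]
      have := ih b
      push_cast
      omega

theorem pvKeepR_skip (s : List Int) (b : Int) (h1 : ∀ x ∈ s, 1 ≤ x)
    (h : (pvKeepR s b).2 ≠ (s.length : Int)) : ∃ f ∈ s, (pvKeepR s b).1 < f := by
  induction s generalizing b with
  | nil => simp [pvKeepR] at h
  | cons f s ih =>
    have h1' : ∀ x ∈ s, 1 ≤ x := fun x hx => h1 x (List.mem_cons_of_mem _ hx)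
    simp only [pvKeepR, List.length_cons] at h ⊢
    by_cases hf : f ≤ b
    · rw [if_pos hf] at h ⊢
      have h' : (pvKeepR s (b - f)).2 ≠ (s.length : Int) := by
        intro he; apply h; push_cast; omega
      obtain ⟨g, hg, hlt⟩ := ih (b - f) h1' h'
      exact ⟨g, List.mem_cons_of_mem _ hg, hlt⟩
    · rw [if_neg hf] at h ⊢
      refine ⟨f, List.mem_cons_self, ?_⟩
      have := pvKeepR_rem_le s b h1'
      omega

theorem pvKeepR_all (s : List Int) (b : Int)
    (h : (pvKeepR s b).2 = (s.length : Int)) : (pvKeepR s b).1 = b - s.sum := by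
  induction s generalizing b with
  | nil => simp [pvKeepR]
  | cons f s ih =>
    simp only [pvKeepR, List.length_cons, List.sum_cons] at h ⊢
    by_cases hf : f ≤ b
    · rw [if_pos hf] at h ⊢
      have h' : (pvKeepR s (b - f)).2 = (s.length : Int) := by push_cast at h; omega
      have := ih (b - f) h'
      omega
    · rw [if_neg hf] at h ⊢
      have := pvKeepR_kept_bounds s b
      push_cast at h
      omega

theorem pvKeepR_of_sum_le (s : List Int) (b : Int) (h0 : ∀ x ∈ s, 0 ≤ x)
    (h : s.sum ≤ b) : pvKeepR s b = (b - s.sum, (s.length : Int)) := by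
  induction s generalizing b with
  | nil => simp [pvKeepR]
  | cons f s ih =>
    have h0' : ∀ x ∈ s, 0 ≤ x := fun x hx => h0 x (List.mem_cons_of_mem _ hx)
    have hsum : 0 ≤ s.sum := List.sum_nonneg h0'
    simp only [List.sum_cons] at h
    have hf : f ≤ b := by omega
    simp only [pvKeepR, if_pos hf, ih (b - f) h0' (by omega), List.length_cons, List.sum_cons,
      Prod.mk.injEq]
    constructor
    · omega
    · push_cast; omega

theorem pvBgreedy_acc (r : List Int) (need removed : Int) :
    pvBgreedy r need removed = removed + pvBgreedy r need 0 := by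
  induction r generalizing need removed with
  | nil => simp [pvBgreedy]
  | cons f r ih =>
    simp only [pvBgreedy]
    by_cases h : need ≤ 0
    · simp [if_pos h]
    · rw [if_neg h, if_neg h, ih (need - f) (removed + 1), ih (need - f) (0 + 1)]
      omega

-- the duel: removing the most frequent values until `sum - b` is spent removes exactly
-- `length - kept` values, where `kept` is what keeping the cheapest within budget `b` keeps
theorem pvDuel (s : List Int) (hp : s.Pairwise (fun a b : Int => a ≤ b))
    (h1 : ∀ x ∈ s, 1 ≤ x) (b : Int) :
    pvBgreedy s.reverse (s.sum - b) 0 = (s.length : Int) - (pvKeepR s b).2 := by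
  induction s using List.reverseRecOn with
  | nil => simp [pvBgreedy, pvKeepR]
  | append_singleton s' M ih =>
    have hps : s'.Pairwise (fun a b : Int => a ≤ b) := (List.pairwise_append.mp hp).1
    have hle : ∀ x ∈ s', x ≤ M := by
      intro x hx
      exact (List.pairwise_append.mp hp).2.2 x hx M List.mem_cons_self
    have h1' : ∀ x ∈ s', 1 ≤ x := fun x hx => h1 x (List.mem_append_left _ hx)
    have hM : 1 ≤ M := h1 M (List.mem_append_right _ List.mem_cons_self)
    rw [List.reverse_append]
    simp only [List.reverse_cons, List.reverse_nil, List.nil_append, List.cons_append,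
      List.sum_append, List.sum_cons, List.sum_nil, List.length_append, List.length_cons,
      List.length_nil]
    rw [pvBgreedy_cons]
    by_cases hneed : s'.sum + (M + 0) - b ≤ 0
    · rw [if_pos hneed]
      have hkeep : pvKeepR (s' ++ [M]) b
          = (b - (s' ++ [M]).sum, ((s' ++ [M]).length : Int)) := by
        refine pvKeepR_of_sum_le _ _ (fun x hx => le_trans (by omega) (h1 x hx)) ?_
        simp only [List.sum_append, List.sum_cons, List.sum_nil]
        omega
      rw [hkeep]
      simp only [List.length_append, List.length_cons, List.length_nil]
      push_cast
      omega
    · rw [if_neg hneed]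
      rw [pvBgreedy_acc]
      have harg : s'.sum + (M + 0) - b - M = s'.sum - b := by omega
      rw [harg, ih hps h1']
      -- the trailing M is not kept: the remaining budget after s' is below M
      have hrem : (pvKeepR s' b).1 < M := by
        by_cases hall : (pvKeepR s' b).2 = (s'.length : Int)
        · have := pvKeepR_all s' b hall
          omega
        · obtain ⟨f, hf, hlt⟩ := pvKeepR_skip s' b h1' hall
          exact lt_of_lt_of_le hlt (hle f hf)
      have hsplit := pvKeepR_append s' [M] b
      have hMskip : pvKeepR [M] (pvKeepR s' b).1 = ((pvKeepR s' b).1, 0) := by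
        simp [pvKeepR, if_neg (by omega : ¬ M ≤ (pvKeepR s' b).1)]
      rw [hMskip] at hsplit
      rw [hsplit]
      push_cast
      omega

-- batch consumption of one frequency bucket: keeping c copies of f greedily keeps
-- min(c, budget // f) of them
theorem pvKeepR_replicate (c : Nat) (f b : Int) (hf : 1 ≤ f) (hb : 0 ≤ b) :
    pvKeepR (List.replicate c f) b
      = (b - min (c : Int) (PySem.Int.floordiv b f) * f,
         min (c : Int) (PySem.Int.floordiv b f)) := by
  rw [PySem.Int.floordiv_eq_ediv_of_pos (by omega)]
  induction c generalizing b with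
  | zero =>
    have : 0 ≤ b / f := Int.ediv_nonneg hb (by omega)
    simp only [List.replicate_zero, pvKeepR, Nat.cast_zero]
    rw [min_eq_left this]
    simp
  | succ c ih =>
    rw [List.replicate_succ]
    by_cases hfb : f ≤ b
    · have hb' : 0 ≤ b - f := by omega
      have hdiv1 : 1 ≤ b / f := by
        rw [Int.le_ediv_iff_mul_le (by omega)]
        omega
      have hstep : (b - f) / f = b / f - 1 := by
        have h' : b - f = b + (-1) * f := by ring
        rw [h', Int.add_mul_ediv_right _ _ (by omega : f ≠ 0)]
        ring
      simp only [pvKeepR, if_pos hfb, ih (b - f) hb']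
      rw [hstep]
      have ht : min ((c : Int) + 1) (b / f) = min (c : Int) (b / f - 1) + 1 := by omega
      push_cast
      rw [ht]
      rw [Prod.mk.injEq]
      constructor
      · ring
      · rfl
    · have hdiv0 : b / f = 0 := Int.ediv_eq_zero_of_lt hb (by omega)
      simp only [pvKeepR, if_neg hfb, ih b hb, hdiv0]
      have h0 : min ((c : Int)) 0 = 0 := by omega
      have h1' : min ((c : Int) + 1) 0 = 0 := by omega
      push_cast
      rw [h0, h1', Prod.mk.injEq]
      constructor <;> omega

-- B's bucket loop over ascending f is the per-element keep over the flattened ascending list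
theorem pvFoldKeep (m : List Int) (L : List Int) (hL : ∀ f ∈ L, 1 ≤ f) (b k : Int)
    (hb : 0 ≤ b) :
    L.foldl (fun (st : Int × Int) f =>
        let take := min ((List.count f m : Nat) : Int) (PySem.Int.floordiv st.1 f)
        (st.1 - take * f, st.2 + take)) (b, k)
      = ((pvKeepR (L.flatMap (fun f => List.replicate (List.count f m) f)) b).1,
         k + (pvKeepR (L.flatMap (fun f => List.replicate (List.count f m) f)) b).2) := by
  induction L generalizing b k with
  | nil => simp [pvKeepR]
  | cons f L ih =>
    have hf : 1 ≤ f := hL f List.mem_cons_self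
    have hL' : ∀ g ∈ L, 1 ≤ g := fun g hg => hL g (List.mem_cons_of_mem _ hg)
    simp only [List.foldl_cons, List.flatMap_cons]
    rw [pvKeepR_append, pvKeepR_replicate _ _ _ hf hb]
    have hdvnn : 0 ≤ PySem.Int.floordiv b f := by
      rw [PySem.Int.floordiv_eq_ediv_of_pos (by omega)]
      exact Int.ediv_nonneg hb (by omega)
    set t := min ((List.count f m : Nat) : Int) (PySem.Int.floordiv b f) with ht
    have htn : 0 ≤ t := by
      rw [ht]
      have : (0 : Int) ≤ ((List.count f m : Nat) : Int) := by positivity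
      omega
    have htf : t * f ≤ b := by
      have h1 : t ≤ PySem.Int.floordiv b f := by rw [ht]; omega
      have h2 : PySem.Int.floordiv b f * f ≤ b := by
        rw [PySem.Int.floordiv_eq_ediv_of_pos (by omega)]
        have h4 := Int.mul_ediv_add_emod b f
        have h5 := Int.emod_nonneg b (by omega : f ≠ 0)
        nlinarith [mul_comm (b / f) f]
      calc t * f ≤ PySem.Int.floordiv b f * f := by
            exact mul_le_mul_of_nonneg_right h1 (by omega)
        _ ≤ b := h2
    rw [ih hL' (b - t * f) (k + t) (by omega)]
    exact Prod.ext rfl (by simp only; omega)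

-- ascending-flat pairwise (the mirror of pvFlat_pairwise)
theorem pvFlat_pairwise_le (so : List Int) (n : Int → Nat)
    (h : so.Pairwise (fun a b : Int => a ≤ b)) :
    (so.flatMap (fun c => List.replicate (n c) c)).Pairwise (fun a b : Int => a ≤ b) := by
  induction so with
  | nil => simp
  | cons a so ih =>
    rcases List.pairwise_cons.mp h with ⟨ha, h'⟩
    simp only [List.flatMap_cons]
    rw [List.pairwise_append]
    refine ⟨List.pairwise_replicate.mpr (Or.inr le_rfl), ih h', ?_⟩
    intro x hx y hy
    rcases List.mem_flatMap.mp hy with ⟨c, hc, hyc⟩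
    rw [List.eq_of_mem_replicate hx, List.eq_of_mem_replicate hyc]
    exact ha c hc

-- dropping non-members of m from the bucket walk changes nothing (their buckets are empty)
theorem pvFlatMap_eq_filter (m R : List Int) :
    R.flatMap (fun f => List.replicate (List.count f m) f)
      = (R.filter (fun f => decide (f ∈ m))).flatMap
          (fun f => List.replicate (List.count f m) f) := by
  induction R with
  | nil => rfl
  | cons a R ihR =>
    by_cases ha : a ∈ m
    · simp only [List.flatMap_cons, List.filter_cons, decide_eq_true ha, if_true,
        List.flatMap_cons]
      rw [ihR]
    · have h0 : List.count a m = 0 := List.count_eq_zero.mpr ha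
      simp only [List.flatMap_cons, h0, List.replicate_zero, List.nil_append, List.filter_cons]
      rw [ihR]
      simp [ha]

-- flattening counts along ANY nodup superset of m's values is still a permutation of m
theorem pvFlat_perm_super (m R : List Int) (hnd : R.Nodup) (hsub : ∀ x ∈ m, x ∈ R) :
    (R.flatMap (fun f => List.replicate (List.count f m) f)).Perm m := by
  rw [pvFlatMap_eq_filter]
  have hFnd : (R.filter (fun f => decide (f ∈ m))).Nodup := hnd.filter _
  have hperm : (R.filter (fun f => decide (f ∈ m))).Perm (PySem.Set.ofList m) := by
    refine (List.perm_ext_iff_of_nodup hFnd (PySem.Set.nodup_ofList m)).mpr (fun a => ?_)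
    constructor
    · intro ha
      exact (PySem.Set.mem_ofList _ _).mpr (by simpa using (List.mem_filter.mp ha).2)
    · intro ha
      have ham : a ∈ m := (PySem.Set.mem_ofList _ _).mp ha
      exact List.mem_filter.mpr ⟨hsub a ham, by simpa using ham⟩
  exact (hperm.flatMap (fun a _ => List.Perm.refl _)).trans (pvFlat_perm m)

-- bounds on the frequency list: each frequency is between 1 and n
theorem pvM_bounds (arr : List Int) (x : Int) (hx : x ∈ pvM arr) :
    1 ≤ x ∧ x ≤ (arr.length : Int) := by
  simp only [pvM, List.mem_map] at hx
  obtain ⟨v, hv, rfl⟩ := hx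
  have hvm : v ∈ arr := (PySem.Set.mem_ofList _ _).mp hv
  have h1 : 1 ≤ List.count v arr := List.count_pos_iff.mpr hvm
  have h2 : List.count v arr ≤ arr.length := List.count_le_length
  constructor <;> omega

-- the frequencies sum to the length of the array
theorem pvM_sum (arr : List Int) : (pvM arr).sum = (arr.length : Int) := by
  have hlen := (pvFlat_perm arr).length_eq
  rw [List.length_flatMap] at hlen
  simp only [List.length_replicate] at hlen
  calc (pvM arr).sum
      = (((PySem.Set.ofList arr).map (fun c => List.count c arr)).sum : Nat) := by
        simp [pvM, Nat.cast_list_sum, List.map_map, Function.comp_def]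
    _ = (arr.length : Int) := by rw [hlen]

-- the descending sort is the reverse of the ascending sort (identity key)
theorem pvSorted_rev_eq_reverse (m : List Int) :
    PySem.List.sorted m (fun v => v) true
      = (PySem.List.sorted m (fun v => v) false).reverse := by
  refine PySem.List.eq_of_perm_of_pairwise_le_of_injective (fun x : Int => -x) neg_injective
    ((PySem.List.sorted_perm m _ true).trans
      ((List.reverse_perm _).trans (PySem.List.sorted_perm m _ false)).symm) ?_ ?_
  · exact (PySem.List.sorted_pairwise_rev m (fun v => v)).imp
      (fun h => by simpa using neg_le_neg h)
  · rw [List.pairwise_reverse]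
    exact (PySem.List.sorted_pairwise m (fun v => v)).imp
      (fun h => by simpa using neg_le_neg h)

-- the ascending sort of the frequency list is the flattened bucket walk over 1..n
theorem pvSorted_asc_eq_flat (arr : List Int) :
    PySem.List.sorted (pvM arr) (fun v => v) false
      = (PySem.List.pyRange 1 ((arr.length : Int) + 1) 1).flatMap
          (fun f => List.replicate (List.count f (pvM arr)) f) := by
  have hR : (PySem.List.pyRange 1 ((arr.length : Int) + 1) 1).Nodup :=
    PySem.List.nodup_pyRange_one _ _
  have hsub : ∀ x ∈ pvM arr, x ∈ PySem.List.pyRange 1 ((arr.length : Int) + 1) 1 := by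
    intro x hx
    have := pvM_bounds arr x hx
    rw [PySem.List.mem_pyRange_one]
    omega
  refine PySem.List.sorted_id_eq_of_perm_of_pairwise _ _ (pvFlat_perm_super _ _ hR hsub) ?_
  exact pvFlat_pairwise_le _ _
    ((PySem.List.pairwise_lt_pyRange_one 1 _).imp (fun h => le_of_lt h))

-- ===== VERDICT (by name: the statement is the Claim_ definition above) =====
theorem reduce_array_to_half_spec : Claim_equal_reduce_array_to_half := by
  intro arr _
  unfold Spec_reduce_array_to_half
  set n : Int := (arr.length : Int) with hn
  set m := pvM arr with hm
  have hb0 : 0 ≤ PySem.Int.floordiv n 2 := by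
    rw [PySem.Int.floordiv_eq_ediv_of_pos (by omega)]
    exact Int.ediv_nonneg (by positivity) (by omega)
  -- A's side: the greedy removal over the descending-sorted frequency list
  have hA : reduce_array_to_half arr
      = pvBgreedy (PySem.List.sorted m (fun v => v) true) (n - PySem.Int.floordiv n 2) 0 := by
    have h0 : reduce_array_to_half arr
        = pvAloop arr.length (pvAfold arr)
            ((PySem.List.sorted (pvAfold arr).keys (fun k => k) false).reverse)
            (PySem.Int.floordiv n 2) n 0 := by
      simp only [reduce_array_to_half]
      rw [PySem.List.slice?_none_none_neg_one]
      rfl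
    rw [h0]
    exact pvAssemble arr.length (pvAfold arr) m (pvAfold_keys arr)
      (pvAfold_len arr) (by simpa [hm, pvM] using PySem.Set.length_ofList_le arr)
  -- B's side: the bucket loop is the per-element keep over the ascending-sorted frequency list
  have hcounts : arr.foldl (fun d x => d.insert x (d.getD x 0 + 1)) PySem.Dict.empty
      = PySem.Dict.counter arr := PySem.Dict.foldl_insert_getD_add_one_eq_counter arr
  have hvalues : (PySem.Dict.counter arr).values = m := by
    rw [hm]
    simp [PySem.Dict.values, PySem.Dict.items_counter, pvM, List.map_map, Function.comp_def]
  have hsize : ((PySem.Dict.counter arr).size : Int) = (m.length : Int) := by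
    have : (PySem.Dict.counter arr).size = (PySem.Dict.counter arr).items.length := rfl
    rw [this, PySem.Dict.items_counter]
    simp [hm, pvM]
  set S := (PySem.List.pyRange 1 (n + 1) 1).flatMap
      (fun f => List.replicate (List.count f m) f) with hS
  have hB : reduce_array_to_half_alt arr = (m.length : Int) - (pvKeepR S (PySem.Int.floordiv n 2)).2 := by
    simp only [reduce_array_to_half_alt]
    rw [hcounts, hvalues]
    rw [PySem.Dict.foldl_insert_getD_add_one_eq_counter m]
    have hfun : (fun (st : Int × Int) f =>
        let take := min ((PySem.Dict.counter m).getD f 0) (PySem.Int.floordiv st.1 f)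
        (st.1 - take * f, st.2 + take))
        = (fun (st : Int × Int) f =>
        let take := min ((List.count f m : Nat) : Int) (PySem.Int.floordiv st.1 f)
        (st.1 - take * f, st.2 + take)) := by
      funext st f
      rw [PySem.Dict.getD_counter]
    rw [hfun, pvFoldKeep m _ (fun f hf => (PySem.List.mem_pyRange_one.mp hf).1) _ 0 hb0]
    rw [hsize, ← hS]
    omega
  -- the duel joins the two sides
  set sAsc := PySem.List.sorted m (fun v => v) false with hsAsc
  have hSasc : S = sAsc := by rw [hS, hsAsc, hm, pvSorted_asc_eq_flat, hn]
  have hsum : sAsc.sum = n := by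
    rw [hsAsc, (PySem.List.sorted_perm m (fun v => v) false).sum_eq, hm, pvM_sum, hn]
  have hlenAsc : (sAsc.length : Int) = (m.length : Int) := by
    rw [hsAsc, (PySem.List.sorted_perm m (fun v => v) false).length_eq]
  have hmem : ∀ x ∈ sAsc, 1 ≤ x := by
    intro x hx
    have hxm : x ∈ m := (PySem.List.mem_sorted m (fun v => v) false x).mp (by rwa [← hsAsc])
    exact (pvM_bounds arr x (hm ▸ hxm)).1
  have hduel := pvDuel sAsc
    (by simpa using PySem.List.sorted_pairwise m (fun v => v))
    hmem
    (PySem.Int.floordiv n 2)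
  rw [hA, pvSorted_rev_eq_reverse, ← hsAsc, hB, hSasc]
  rw [hsum] at hduel
  rw [hduel, hlenAsc]
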